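-- pv_equiv track=rewrite | github.com/new32/east_py | Example/ExampleLib.py | while_test2
-- ===== SOURCE A (Python) =====
-- def while_test2(loop_count, limit):
--   count = 0
--   while count < loop_count:
--     count += 1
--     if count == limit:
--       count = 0
--       break
--   else:
--     count += 100
--   return count
-- ===== SOURCE B (Python) =====
-- def while_test2(loop_count, limit):
--   # Closed form: the loop hits `limit` iff 1 <= limit <= loop_count (return 0);
--   # otherwise it runs to the end and returns max(loop_count, 0) + 100.
--   if 1 <= limit <= loop_count:
--     return 0
--   return max(loop_count, 0) + 100
-- ===== Notes on version B (the rewrite author's own statement) =====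
-- stated objective: faster
-- what changed: Replaced the counting while-loop (with for-else break semantics) by a closed-form case analysis: 0 if 1<=limit<=loop_count, else max(loop_count,0)+100.
import Mathlib
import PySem

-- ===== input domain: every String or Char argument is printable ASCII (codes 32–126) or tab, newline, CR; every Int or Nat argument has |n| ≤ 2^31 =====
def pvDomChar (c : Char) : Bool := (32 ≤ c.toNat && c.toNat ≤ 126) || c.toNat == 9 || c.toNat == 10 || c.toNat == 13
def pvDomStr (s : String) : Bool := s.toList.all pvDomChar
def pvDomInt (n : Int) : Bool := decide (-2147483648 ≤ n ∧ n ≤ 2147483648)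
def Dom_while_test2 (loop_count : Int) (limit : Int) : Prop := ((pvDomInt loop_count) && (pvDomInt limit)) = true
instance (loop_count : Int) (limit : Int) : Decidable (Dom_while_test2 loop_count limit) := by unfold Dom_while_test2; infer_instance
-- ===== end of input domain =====

-- B replaces A's counting while-loop by an O(1) closed-form case analysis (faster, asymptotic).

-- ===== PORT A =====
-- fuel-indexed transcription of the while loop; fuel = loop_count.toNat suffices
-- since count increases by 1 each iteration starting from 0
def whileLoopA : Nat → Int → Int → Int → Int
  | 0, count, _, _ => count + 100          -- while condition exhausted → else: count += 100
  | f + 1, count, lc, lim =>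
    if count < lc then
      if count + 1 = lim then 0            -- count += 1; count == limit → count = 0; break
      else whileLoopA f (count + 1) lc lim
    else count + 100                       -- loop ends normally → else: count += 100

def while_test2 (loop_count : Int) (limit : Int) : Int :=
  whileLoopA loop_count.toNat 0 loop_count limit

-- ===== PORT B =====
def while_test2_alt (loop_count : Int) (limit : Int) : Int :=
  if 1 ≤ limit ∧ limit ≤ loop_count then 0
  else max loop_count 0 + 100

-- ===== PRECONDITION & SPEC =====
def Spec_while_test2 (loop_count : Int) (limit : Int) (out : Int) : Prop := out = while_test2_alt loop_count limit
instance (loop_count : Int) (limit : Int) (out : Int) : Decidable (Spec_while_test2 loop_count limit out) := by unfold Spec_while_test2; infer_instance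

-- ===== CLAIM (what is proved, stated in full; the proofs are below) =====
def Claim_equal_while_test2 : Prop := ∀ (loop_count : Int) (limit : Int), Dom_while_test2 loop_count limit → Spec_while_test2 loop_count limit (while_test2 loop_count limit)

-- ===== LEMMAS AND PROOFS =====
theorem whileLoopA_eq (f : Nat) (c lc lim : Int) (hc : 0 ≤ c) (hf : lc ≤ c + f) :
    whileLoopA f c lc lim =
      if c < lim ∧ lim ≤ lc then 0 else max lc c + 100 := by
  induction f generalizing c with
  | zero =>
    simp only [whileLoopA]
    rw [if_neg, max_eq_right] <;> omega
  | succ f ih =>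
    simp only [whileLoopA]
    by_cases h1 : c < lc
    · rw [if_pos h1]
      by_cases h2 : c + 1 = lim
      · rw [if_pos h2, if_pos]; omega
      · rw [if_neg h2, ih (c + 1) (by omega) (by omega)]
        by_cases h3 : c + 1 < lim ∧ lim ≤ lc
        · rw [if_pos h3, if_pos (by omega)]
        · rw [if_neg h3, if_neg (by omega)]
          congr 1
          omega
    · rw [if_neg h1, if_neg (by omega), max_eq_right (by omega)]

-- ===== VERDICT (by name: the statement is the Claim_ definition above) =====
theorem while_test2_spec : Claim_equal_while_test2 := by
  intro lc lim _
  unfold Spec_while_test2 while_test2 while_test2_alt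
  rw [whileLoopA_eq _ _ _ _ le_rfl (by omega)]
  by_cases h : 1 ≤ lim ∧ lim ≤ lc
  · rw [if_pos h, if_pos (by omega)]
  · rw [if_neg h, if_neg (by omega)]
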